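-- pv_equiv track=rewrite | github.com/Max-yf/cell_seg_autoresearch | scripts/propose_trial.py | risk_summary
-- ===== SOURCE A (Python) =====
-- def risk_summary(paths: list[str]) -> dict[str, str]:
--     artifact_keys = {"step3_cellpose_3d.cellprob_threshold", "step3_cellpose_3d.min_size", "step3_cellpose_3d.rescale"}
--     oom_keys = {"step3_cellpose_3d.batch_size_3d", "step3_cellpose_3d.bsize", "step3_cellpose_3d.rescale"}
--     runtime_keys = {"step1_sparse_sim.sparse_iter", "step1_sparse_sim.deconv_iter", "step3_cellpose_3d.batch_size_3d"}
--     return {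
--         "oom_risk": "medium" if any(p in oom_keys for p in paths) else "low",
--         "artifact_risk": "medium" if any(p in artifact_keys for p in paths) else "low",
--         "runtime_risk": "medium" if any(p in runtime_keys for p in paths) else "low",
--     }
-- ===== SOURCE B (Python) =====
-- def risk_summary(paths: list[str]) -> dict[str, str]:
--     artifact_keys = {"step3_cellpose_3d.cellprob_threshold", "step3_cellpose_3d.min_size", "step3_cellpose_3d.rescale"}
--     oom_keys = {"step3_cellpose_3d.batch_size_3d", "step3_cellpose_3d.bsize", "step3_cellpose_3d.rescale"}
--     runtime_keys = {"step1_sparse_sim.sparse_iter", "step1_sparse_sim.deconv_iter", "step3_cellpose_3d.batch_size_3d"}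
--     oom = artifact = runtime = False
--     for p in paths:
--         if p in oom_keys:
--             oom = True
--         if p in artifact_keys:
--             artifact = True
--         if p in runtime_keys:
--             runtime = True
--         if oom and artifact and runtime:
--             break
--     return {
--         "oom_risk": "medium" if oom else "low",
--         "artifact_risk": "medium" if artifact else "low",
--         "runtime_risk": "medium" if runtime else "low",
--     }
-- ===== Notes on version B (the rewrite author's own statement) =====
-- stated objective: alternative
-- what changed: Three independent any() scans over paths are fused into a single pass maintaining three boolean flags, with an early break once all three risks are detected.
import Mathlib
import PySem

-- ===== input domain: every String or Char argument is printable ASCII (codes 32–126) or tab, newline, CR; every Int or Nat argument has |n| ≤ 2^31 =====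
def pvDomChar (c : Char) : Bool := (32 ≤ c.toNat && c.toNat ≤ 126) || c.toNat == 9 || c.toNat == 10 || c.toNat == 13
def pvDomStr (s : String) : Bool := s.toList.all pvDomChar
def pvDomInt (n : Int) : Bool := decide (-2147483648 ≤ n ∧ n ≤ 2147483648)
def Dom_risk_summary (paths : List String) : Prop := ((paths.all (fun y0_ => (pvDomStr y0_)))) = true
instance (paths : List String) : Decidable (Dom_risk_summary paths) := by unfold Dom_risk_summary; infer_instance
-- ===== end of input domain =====

-- B fuses A's three independent any() membership scans over paths into one pass
-- maintaining three boolean flags with an early break; same return value (alternative decomposition).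

-- ===== PORT A =====
-- A's three set literals
def pvArtifactKeys : PySem.Set String :=
  PySem.Set.ofList ["step3_cellpose_3d.cellprob_threshold", "step3_cellpose_3d.min_size", "step3_cellpose_3d.rescale"]
def pvOomKeys : PySem.Set String :=
  PySem.Set.ofList ["step3_cellpose_3d.batch_size_3d", "step3_cellpose_3d.bsize", "step3_cellpose_3d.rescale"]
def pvRuntimeKeys : PySem.Set String :=
  PySem.Set.ofList ["step1_sparse_sim.sparse_iter", "step1_sparse_sim.deconv_iter", "step3_cellpose_3d.batch_size_3d"]

def risk_summary (paths : List String) : List (String × String) :=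
  [("oom_risk", if paths.any (fun p => PySem.Set.contains pvOomKeys p) then "medium" else "low"),
   ("artifact_risk", if paths.any (fun p => PySem.Set.contains pvArtifactKeys p) then "medium" else "low"),
   ("runtime_risk", if paths.any (fun p => PySem.Set.contains pvRuntimeKeys p) then "medium" else "low")]

-- ===== PORT B =====
-- single fused pass with three flags and an early break once all are set
def pvRiskLoop : List String → Bool → Bool → Bool → Bool × Bool × Bool
  | [], oom, art, run => (oom, art, run)
  | p :: rest, oom, art, run =>
    let oom := if PySem.Set.contains pvOomKeys p then true else oom
    let art := if PySem.Set.contains pvArtifactKeys p then true else art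
    let run := if PySem.Set.contains pvRuntimeKeys p then true else run
    if oom && art && run then (oom, art, run) else pvRiskLoop rest oom art run

def risk_summary_alt (paths : List String) : List (String × String) :=
  let (oom, art, run) := pvRiskLoop paths false false false
  [("oom_risk", if oom then "medium" else "low"),
   ("artifact_risk", if art then "medium" else "low"),
   ("runtime_risk", if run then "medium" else "low")]

-- ===== PRECONDITION & SPEC =====
def Spec_risk_summary (paths : List String) (out : List (String × String)) : Prop := out = risk_summary_alt paths
instance (paths : List String) (out : List (String × String)) : Decidable (Spec_risk_summary paths out) := by unfold Spec_risk_summary; infer_instance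

-- ===== CLAIM (what is proved, stated in full; the proofs are below) =====
def Claim_equal_risk_summary : Prop := ∀ (paths : List String), Dom_risk_summary paths → Spec_risk_summary paths (risk_summary paths)

-- ===== LEMMAS AND PROOFS =====
theorem pvRiskLoop_eq (paths : List String) (oom art run : Bool) :
    pvRiskLoop paths oom art run =
      (oom || paths.any (fun p => PySem.Set.contains pvOomKeys p),
       art || paths.any (fun p => PySem.Set.contains pvArtifactKeys p),
       run || paths.any (fun p => PySem.Set.contains pvRuntimeKeys p)) := by
  induction paths generalizing oom art run with
  | nil => simp [pvRiskLoop]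
  | cons p rest ih =>
    simp only [pvRiskLoop, List.any_cons]
    split_ifs with h1 h2 h3 h
    all_goals first
      | (rw [ih]; simp_all)
      | simp_all

-- ===== VERDICT (by name: the statement is the Claim_ definition above) =====
theorem risk_summary_spec : Claim_equal_risk_summary := by
  intro paths _
  unfold Spec_risk_summary risk_summary risk_summary_alt
  rw [pvRiskLoop_eq]
  simp
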